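-- pv_equiv track=rewrite | github.com/Exlany/lipro-hass | custom_components/lipro/core/coordinator/runtime/device/filter.py | _collect_property_values
-- ===== SOURCE A (Python) =====
-- from collections.abc import Mapping
-- from typing import Any
--
-- def _normalize_filter_value(value: Any) -> str | None:
--     """Normalize a filter value to lowercase string or None."""
--     if value is None:
--         return None
--     if isinstance(value, str):
--         stripped = value.strip()
--         return stripped.lower() if stripped else None
--     return str(value).strip().lower() or None
--
-- def _collect_normalized_values(
--     payload: Mapping[str, Any],
--     keys: tuple[str, ...],
-- ) -> set[str]:
--     """Collect normalized values from a mapping by candidate keys."""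
--     values: set[str] = set()
--     for key in keys:
--         normalized = _normalize_filter_value(payload.get(key))
--         if normalized is not None:
--             values.add(normalized)
--     return values
--
-- def _collect_property_values(
--     properties: Any,
--     keys: tuple[str, ...],
-- ) -> set[str]:
--     """Collect normalized values from property payload variants."""
--     key_set = set(keys)
--     if isinstance(properties, Mapping):
--         return _collect_normalized_values(properties, keys)
--
--     values: set[str] = set()
--     if not isinstance(properties, list):
--         return values
--
--     for item in properties:
--         if not isinstance(item, Mapping):
--             continue
--         item_key = item.get("key")
--         if item_key not in key_set:
--             continue
--         normalized = _normalize_filter_value(item.get("value"))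
--         if normalized is not None:
--             values.add(normalized)
--     return values
-- ===== SOURCE B (Python) =====
-- from collections.abc import Mapping
-- from typing import Any
--
--
-- def _normalize_filter_value(value: Any) -> str | None:
--     """Normalize a filter value to lowercase string or None."""
--     if value is None:
--         return None
--     if isinstance(value, str):
--         stripped = value.strip()
--         return stripped.lower() if stripped else None
--     return str(value).strip().lower() or None
--
--
-- def _singleton(value: Any) -> "set[str]":
--     """The (possibly empty) set contributed by one raw value."""
--     normalized = _normalize_filter_value(value)
--     return set() if normalized is None else {normalized}
--
--
-- def _collect_property_values(
--     properties: Any,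
--     keys: tuple[str, ...],
-- ) -> set[str]:
--     """Collect normalized values from property payload variants (recursively)."""
--     if isinstance(properties, Mapping):
--         if not keys:
--             return set()
--         return _singleton(properties.get(keys[0])) | _collect_property_values(
--             properties, tuple(keys[1:])
--         )
--     if not isinstance(properties, list) or not properties:
--         return set()
--     head, rest = properties[0], list(properties[1:])
--     here: set[str] = set()
--     if isinstance(head, Mapping) and head.get("key") in keys:
--         here = _singleton(head.get("value"))
--     return here | _collect_property_values(rest, keys)
-- ===== Notes on version B (the rewrite author's own statement) =====
-- stated objective: alternative
-- what changed: A is an imperative loop mutating one accumulator set with continue-guards; B is a structural recursion that returns the union of the head item's (possibly empty) singleton contribution with the recursively collected set of the tail, with a _singleton helper replacing the None-check-then-add pattern.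
import Mathlib
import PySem

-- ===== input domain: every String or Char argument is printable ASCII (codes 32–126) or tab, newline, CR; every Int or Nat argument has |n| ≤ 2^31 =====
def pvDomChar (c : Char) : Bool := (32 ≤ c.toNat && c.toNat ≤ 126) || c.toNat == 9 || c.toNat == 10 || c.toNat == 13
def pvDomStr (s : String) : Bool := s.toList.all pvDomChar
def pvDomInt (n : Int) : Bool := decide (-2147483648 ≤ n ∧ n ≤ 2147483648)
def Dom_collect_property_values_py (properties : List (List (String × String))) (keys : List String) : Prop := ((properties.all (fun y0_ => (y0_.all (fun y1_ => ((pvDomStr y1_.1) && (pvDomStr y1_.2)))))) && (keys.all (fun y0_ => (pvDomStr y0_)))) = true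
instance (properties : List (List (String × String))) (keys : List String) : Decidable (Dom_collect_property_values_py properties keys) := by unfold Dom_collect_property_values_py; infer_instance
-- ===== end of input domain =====

-- B replaces A's imperative accumulator loop by a structural recursion returning the union of the
-- head item's singleton contribution with the tail's set (objective: alternative decomposition).

-- ===== PORT A =====
-- shared helper: both Source A and Source B define the identical _normalize_filter_value
-- (values are strings here, so only the None / str branches are reachable)
def pvNormalize (v : Option String) : Option String :=
  match v with
  | none => none
  | some s =>
      let stripped := PySem.Str.strip s
      if PySem.Str.len stripped ≠ 0 then some (PySem.Str.lower stripped) else none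

def collect_property_values_py (properties : List (List (String × String))) (keys : List String) : List String :=
  let key_set : PySem.Set String := PySem.Set.ofList keys
  -- Mapping / non-list branches unreachable for List input; the for-loop over items:
  properties.foldl (fun values item =>
    match (PySem.Dict.mk item).get? "key" with
    | none => values                                   -- item_key not in key_set → continue
    | some k =>
        if PySem.Set.contains key_set k then
          match pvNormalize ((PySem.Dict.mk item).get? "value") with
          | some n => PySem.Set.add values n
          | none => values
        else values) PySem.Set.empty

-- ===== PORT B =====
-- Source B's _singleton helper
def pvSingleton (v : Option String) : PySem.Set String :=
  match pvNormalize v with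
  | none => PySem.Set.empty
  | some n => PySem.Set.ofList [n]

def collect_property_values_py_alt (properties : List (List (String × String))) (keys : List String) : List String :=
  -- Mapping / non-list branches unreachable for List input; the recursion on the list:
  match properties with
  | [] => PySem.Set.empty
  | head :: rest =>
      let here : PySem.Set String :=
        match (PySem.Dict.mk head).get? "key" with
        | some k => if keys.contains k then pvSingleton ((PySem.Dict.mk head).get? "value")
                    else PySem.Set.empty
        | none => PySem.Set.empty
      PySem.Set.union here (collect_property_values_py_alt rest keys)

-- ===== PRECONDITION & SPEC =====
-- Pre_ excludes association-list rows that repeat the "key" or "value" field: such a row does not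
-- encode a Python dict (a Mapping cannot carry a duplicate key), so no Python input is excluded.
def Pre_collect_property_values_py (properties : List (List (String × String))) (keys : List String) : Prop :=
  ∀ item ∈ properties, (item.map Prod.fst).count "key" ≤ 1 ∧ (item.map Prod.fst).count "value" ≤ 1
instance (properties : List (List (String × String))) (keys : List String) : Decidable (Pre_collect_property_values_py properties keys) := by unfold Pre_collect_property_values_py; infer_instance
def pvWitness_collect_property_values_py : (List (List (String × String))) × List String :=
  ([[("key", "model"), ("value", " ABC-1 ")], [("key", "color"), ("value", "Red")]], ["model", "color"])
def Spec_collect_property_values_py (properties : List (List (String × String))) (keys : List String) (out : List String) : Prop := out = collect_property_values_py_alt properties keys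
instance (properties : List (List (String × String))) (keys : List String) (out : List String) : Decidable (Spec_collect_property_values_py properties keys out) := by unfold Spec_collect_property_values_py; infer_instance

-- ===== CLAIM (what is proved, stated in full; the proofs are below) =====
def Claim_equal_collect_property_values_py : Prop := ∀ (properties : List (List (String × String))) (keys : List String), Dom_collect_property_values_py properties keys → Pre_collect_property_values_py properties keys → Spec_collect_property_values_py properties keys (collect_property_values_py properties keys)

-- ===== LEMMAS AND PROOFS =====

-- sanity: Set.union is Set.update (definitional)
theorem pv_union_eq_update {α : Type} [BEq α] (s t : PySem.Set α) :
    PySem.Set.union s t = PySem.Set.update s t := rfl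

-- membership in the key LIST and in the key SET coincide
theorem pv_contains_eq (keys : List String) (k : String) :
    PySem.Set.contains (PySem.Set.ofList keys) k = keys.contains k := by
  by_cases h : k ∈ keys <;> simp [h]

-- adding inside an update is adding after it
theorem pv_update_add {α : Type} [BEq α] [LawfulBEq α] (acc s : PySem.Set α) (x : α) :
    PySem.Set.update acc (PySem.Set.add s x) = PySem.Set.add (PySem.Set.update acc s) x := by
  by_cases h : x ∈ s
  · rw [PySem.Set.add_of_mem h,
      PySem.Set.add_of_mem ((PySem.Set.mem_update _ _ _).2 (Or.inr h))]
  · rw [PySem.Set.add_of_not_mem h, PySem.Set.update_append, PySem.Set.update_cons,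
      PySem.Set.update_nil]

-- updating with an update is updating twice
theorem pv_update_update {α : Type} [BEq α] [LawfulBEq α] (acc s : PySem.Set α) (t : List α) :
    PySem.Set.update acc (PySem.Set.update s t)
      = PySem.Set.update (PySem.Set.update acc s) t := by
  induction t generalizing s with
  | nil => rw [PySem.Set.update_nil, PySem.Set.update_nil]
  | cons x xs ih =>
      simp only [PySem.Set.update_cons]
      rw [ih, pv_update_add]

-- Source B's _singleton never yields duplicates
theorem pv_singleton_nodup (v : Option String) : (pvSingleton v).Nodup := by
  unfold pvSingleton
  cases pvNormalize v with
  | none => exact List.nodup_nil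
  | some n => exact PySem.Set.nodup_ofList _

-- B's result has no duplicates
theorem pv_alt_nodup (properties : List (List (String × String))) (keys : List String) :
    (collect_property_values_py_alt properties keys).Nodup := by
  induction properties with
  | nil => exact List.nodup_nil
  | cons head rest ih =>
      show ((match (PySem.Dict.mk head).get? "key" with
        | some k => if keys.contains k then pvSingleton ((PySem.Dict.mk head).get? "value")
                    else PySem.Set.empty
        | none => PySem.Set.empty).union (collect_property_values_py_alt rest keys)).Nodup
      apply PySem.Set.nodup_union
      cases (PySem.Dict.mk head).get? "key" with
      | none => exact List.nodup_nil
      | some k =>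
          dsimp only
          split
          · exact pv_singleton_nodup _
          · exact List.nodup_nil

-- A's loop from any accumulator is the accumulator updated with B's result
theorem pv_foldl_eq_update (keys : List String) (properties : List (List (String × String)))
    (acc : PySem.Set String) :
    properties.foldl (fun values item =>
      match (PySem.Dict.mk item).get? "key" with
      | none => values
      | some k =>
          if PySem.Set.contains (PySem.Set.ofList keys) k then
            match pvNormalize ((PySem.Dict.mk item).get? "value") with
            | some n => PySem.Set.add values n
            | none => values
          else values) acc
    = PySem.Set.update acc (collect_property_values_py_alt properties keys) := by
  induction properties generalizing acc with
  | nil => rw [List.foldl_nil]; rfl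
  | cons head rest ih =>
      rw [List.foldl_cons]
      show _ = PySem.Set.update acc (PySem.Set.union _ (collect_property_values_py_alt rest keys))
      rw [pv_union_eq_update, pv_update_update]
      cases hk : (PySem.Dict.mk head).get? "key" with
      | none =>
          dsimp only
          rw [ih]
          rfl
      | some k =>
          dsimp only
          rw [pv_contains_eq]
          by_cases hc : keys.contains k
          · simp only [hc, if_true]
            unfold pvSingleton
            cases hn : pvNormalize ((PySem.Dict.mk head).get? "value") with
            | none =>
                rw [ih]
                rfl
            | some n =>
                rw [ih (PySem.Set.add acc n)]
                dsimp only
                rw [show PySem.Set.ofList [n] = PySem.Set.add PySem.Set.empty n from rfl,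
                  pv_update_add, show PySem.Set.update acc PySem.Set.empty = acc from rfl]
          · simp only [hc]
            rw [ih]
            rfl

theorem collect_eq (properties : List (List (String × String))) (keys : List String) :
    collect_property_values_py properties keys = collect_property_values_py_alt properties keys := by
  unfold collect_property_values_py
  rw [pv_foldl_eq_update, PySem.Set.update_empty]
  exact PySem.Set.ofList_eq_self_of_nodup _ (pv_alt_nodup properties keys)

-- ===== VERDICT (by name: the statement is the Claim_ definition above) =====
theorem collect_property_values_py_spec : Claim_equal_collect_property_values_py := by
  intro properties keys _ _
  exact collect_eq properties keys
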